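-- pv_equiv track=rewrite | github.com/pypi-data/pypi-mirror-240 | packages/Finance-Ultron/Finance-Ultron-1.3.2.tar.gz/Finance-Ultron-1.3.2/ultron/kdutils/str_util.py | digit_str
-- ===== SOURCE A (Python) =====
-- def digit_str(item):
--     """
--         从第一个字符开始删除，直到所有字符都是数字为止，或者item长度 < 2
--         eg:
--             input:  ABuStrUtil.digit_str('sh000001')
--             output: 000001
--
--             input:  ABuStrUtil.digit_str('shszsh000001')
--             output: 000001
--     :param item: 字符串对象
--     :return: 过滤head字母的字符串对象
--     """
--     while True:
--         if item.isdigit():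
--             break
--         if len(item) < 2:
--             break
--         item = item[1:]
--     return item
-- ===== SOURCE B (Python) =====
-- def digit_str(item):
--     i = len(item)
--     while i > 0 and item[i - 1].isdigit():
--         i -= 1
--     if i == 0:
--         return item
--     if i < len(item):
--         return item[i:]
--     return item[-1:]
-- ===== Notes on version B (the rewrite author's own statement) =====
-- stated objective: faster
-- what changed: Instead of repeatedly re-testing isdigit on the whole remaining string and slicing off one head character per iteration, B scans once from the right to find the boundary of the trailing all-digit run and returns that suffix (or the whole string / the last character in the edge cases) with a single slice.
import Mathlib
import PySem

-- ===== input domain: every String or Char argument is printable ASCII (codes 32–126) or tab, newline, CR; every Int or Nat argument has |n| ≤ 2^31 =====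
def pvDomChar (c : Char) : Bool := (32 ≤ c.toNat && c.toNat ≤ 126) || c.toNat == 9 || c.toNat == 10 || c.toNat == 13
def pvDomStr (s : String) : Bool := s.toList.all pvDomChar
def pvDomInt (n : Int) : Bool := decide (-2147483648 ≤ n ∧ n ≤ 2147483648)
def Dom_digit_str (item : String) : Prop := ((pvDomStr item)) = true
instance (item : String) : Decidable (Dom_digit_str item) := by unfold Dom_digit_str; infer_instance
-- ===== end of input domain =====

-- B replaces A's quadratic drop-one-head-and-retest loop by a single right-to-left scan for
-- the trailing digit run and one slice (objective: faster, asymptotic).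


-- ===== PORT A =====
-- while True: if item.isdigit(): break; if len(item) < 2: break; item = item[1:]
def digitStrA (l : List Char) : List Char :=
  if PySem.Chars.strIsdigit l then l
  else if l.length < 2 then l
  else digitStrA (PySem.List.slice l (some 1) none)
termination_by l.length
decreasing_by
  rw [PySem.List.slice_from_one]
  simp only [List.length_tail]
  omega

def digit_str (item : String) : String := String.ofList (digitStrA item.toList)

-- ===== PORT B =====
-- while i > 0 and item[i-1].isdigit(): i -= 1   (the loop counter i is the recursion argument)
def bLoop (s : List Char) : Nat → Nat
  | 0 => 0
  | i + 1 =>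
      if (PySem.List.pyGet? s (i : Int)).elim false PySem.Chars.isdigit then bLoop s i
      else i + 1

def digit_str_alt (item : String) : String :=
  let s := item.toList
  let i := bLoop s s.length
  if i = 0 then item
  else if i < s.length then String.ofList (PySem.List.slice s (some (i : Int)) none)
  else String.ofList (PySem.List.slice s (some (-1)) none)

-- ===== PRECONDITION & SPEC =====
def Spec_digit_str (item : String) (out : String) : Prop := out = digit_str_alt item
instance (item : String) (out : String) : Decidable (Spec_digit_str item out) := by unfold Spec_digit_str; infer_instance

-- ===== CLAIM (what is proved, stated in full; the proofs are below) =====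
def Claim_equal_digit_str : Prop := ∀ (item : String), Dom_digit_str item → Spec_digit_str item (digit_str item)

-- ===== LEMMAS AND PROOFS =====

-- B's body on the list level (proof helper)
def altList (s : List Char) : List Char :=
  let i := bLoop s s.length
  if i = 0 then s
  else if i < s.length then PySem.List.slice s (some (i : Int)) none
  else PySem.List.slice s (some (-1)) none

theorem bLoop_le (s : List Char) (i : Nat) : bLoop s i ≤ i := by
  induction i with
  | zero => simp [bLoop]
  | succ i ih => unfold bLoop; split <;> omega

theorem bLoop_all_digit (s : List Char) (h : ∀ c ∈ s, PySem.Chars.isdigit c)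
    (i : Nat) (hi : i ≤ s.length) : bLoop s i = 0 := by
  induction i with
  | zero => rfl
  | succ i ih =>
      unfold bLoop
      have hlt : i < s.length := by omega
      rw [PySem.List.pyGet?_natCast, List.getElem?_eq_getElem hlt]
      simp only [Option.elim]
      rw [if_pos (h _ (s.getElem_mem hlt))]
      exact ih (by omega)

theorem bLoop_zero_digit (s : List Char) (i : Nat) (hi : i ≤ s.length)
    (h : bLoop s i = 0) : ∀ j, (hj : j < i) → PySem.Chars.isdigit s[j] := by
  induction i with
  | zero => omega
  | succ i ih =>
      intro j hj
      unfold bLoop at h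
      rw [PySem.List.pyGet?_natCast, List.getElem?_eq_getElem (by omega)] at h
      simp only [Option.elim] at h
      split at h
      · rcases Nat.lt_succ_iff_lt_or_eq.mp hj with hlt | rfl
        · exact ih (by omega) h j hlt
        · assumption
      · omega

theorem bLoop_cons (c : Char) (t : List Char) (i : Nat) :
    bLoop (c :: t) (i + 1) =
      if bLoop t i = 0 then (if PySem.Chars.isdigit c then 0 else 1) else bLoop t i + 1 := by
  induction i with
  | zero => simp [bLoop, PySem.List.pyGet?, PySem.List.pyIdx?]
  | succ i ih =>
      have hidx : PySem.List.pyGet? (c :: t) ((i + 1 : Nat) : Int) = PySem.List.pyGet? t (i : Int) := by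
        rw [PySem.List.pyGet?_natCast, PySem.List.pyGet?_natCast]
        simp
      conv_lhs => unfold bLoop
      conv_rhs => rw [show bLoop t (i + 1) = if (PySem.List.pyGet? t (i : Int)).elim false PySem.Chars.isdigit then bLoop t i else i + 1 from rfl]
      push_cast at hidx ⊢
      rw [hidx]
      split
      · rw [ih]
      · simp

theorem digitStrA_eq_altList (l : List Char) : digitStrA l = altList l := by
  fun_induction digitStrA l with
  | case1 l hdig =>
      -- item.isdigit(): the whole string is digits, bLoop hits 0
      simp only [PySem.Chars.strIsdigit, Bool.and_eq_true, List.all_eq_true] at hdig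
      have h0 : bLoop l l.length = 0 :=
        bLoop_all_digit l (fun c hc => hdig.2 c hc) l.length le_rfl
      simp [altList, h0]
  | case2 l hdig hlen =>
      -- len(item) < 2: nil or one non-digit char
      match l with
      | [] => simp [altList, bLoop]
      | [c] =>
          simp only [PySem.Chars.strIsdigit, List.isEmpty_cons, Bool.not_false, Bool.true_and,
            List.all_cons, List.all_nil, Bool.and_true] at hdig
          simp only [altList, List.length_cons, List.length_nil]
          rw [show bLoop [c] 1 = if (PySem.List.pyGet? [c] ((0 : Nat) : Int)).elim false PySem.Chars.isdigit then bLoop [c] 0 else 1 from rfl]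
          rw [PySem.List.pyGet?_natCast]
          simp [hdig, PySem.List.slice_from_neg_one]
      | _ :: _ :: _ => simp at hlen
  | case3 l hdig hlen ih =>
      match l with
      | c :: t =>
        rw [PySem.List.slice_from_one] at ih ⊢
        simp only [List.tail_cons] at ih ⊢
        rw [ih]
        have hn : 1 ≤ t.length := by simp only [List.length_cons] at hlen; omega
        simp only [altList, List.length_cons]
        rw [bLoop_cons]
        by_cases h0 : bLoop t t.length = 0
        · -- all of t is digits, so c is not a digit (else the whole string were digits)
          have ht : ∀ x ∈ t, PySem.Chars.isdigit x := by
            intro x hx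
            obtain ⟨j, hj, rfl⟩ := List.mem_iff_getElem.mp hx
            exact bLoop_zero_digit t t.length le_rfl h0 j hj
          have hc : ¬ PySem.Chars.isdigit c := by
            intro hcd
            apply hdig
            simp only [PySem.Chars.strIsdigit, List.isEmpty_cons, Bool.not_false, Bool.true_and,
              List.all_eq_true]
            intro x hx
            rcases List.mem_cons.mp hx with rfl | hx'
            · exact hcd
            · exact ht x hx'
          rw [if_pos h0, if_neg hc, if_pos h0]
          have h1lt : 1 < t.length + 1 := by omega
          simp only [if_neg (one_ne_zero), if_pos h1lt]
          rw [show ((1 : Nat) : Int) = (1 : Int) from rfl] at *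
          rw [PySem.List.slice_from_one]
          simp
        · rw [if_neg h0, if_neg h0]
          have hle : bLoop t t.length ≤ t.length := bLoop_le t t.length
          set j := bLoop t t.length with hj
          have hj1 : ¬ (j + 1 = 0) := by omega
          rw [if_neg hj1]
          by_cases hjl : j < t.length
          · rw [if_pos hjl, if_pos (by omega : j + 1 < t.length + 1)]
            rw [show ((j + 1 : Nat) : Int) = ((j : Nat) : Int) + 1 by push_cast; ring]
            rw [show ((j : Nat) : Int) + 1 = (((j + 1 : Nat)) : Int) by push_cast; ring]
            rw [PySem.List.slice_from_natCast, PySem.List.slice_from_natCast]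
            simp
          · rw [if_neg hjl, if_neg (by omega : ¬ (j + 1 < t.length + 1))]
            rw [PySem.List.slice_from_neg_one, PySem.List.slice_from_neg_one]
            have : j = t.length := by omega
            simp only [List.length_cons]
            rw [Nat.add_sub_cancel]
            match t, hn with
            | x :: t', _ => simp [List.drop_succ_cons]

theorem digit_str_alt_eq (item : String) :
    digit_str_alt item = String.ofList (altList item.toList) := by
  unfold digit_str_alt altList
  dsimp only
  split_ifs
  · exact String.ofList_toList.symm
  · rfl
  · rfl

-- ===== VERDICT (by name: the statement is the Claim_ definition above) =====
theorem digit_str_spec : Claim_equal_digit_str := by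
  intro item _
  unfold Spec_digit_str
  rw [digit_str_alt_eq, digit_str, digitStrA_eq_altList]
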